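-- pv_equiv track=rewrite | github.com/coredac/dataflow | backup_scripts/maintenance_scripts/fix_v5.py | process_meta
-- ===== SOURCE A (Python) =====
-- def is_debug(l):
--     s = l.strip()
--     if not s: return False
--     # Common patterns for debug/info in this tool
--     if s.startswith("[DEBUG]") or s.startswith("[MapToAccelerator") or \
--        s.startswith("Collecting recurrence") or s.startswith("[calculateResMii]") or \
--        s.startswith("Dumping DFG") or s.startswith("[generate-code]") or \
--        s.startswith("Recurrence cycle"):
--         return True
--     # The output in the logs shows indented lines under "Recurrence cycle" are also part of debug
--     # but they might look like IR. However, they are usually inside a block.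
--     return False
--
-- def process_meta(lines, limit=25):
--     res = []
--     skip_next = False
--     count = 0
--     for l in lines:
--         s = l.strip()
--         if not s: continue
--         if is_debug(l):
--             skip_next = True
--             continue
--
--         prefix = "CHECK" # generic placeholder
--         res.append( (skip_next, s) )
--         skip_next = False
--         count += 1
--         if count >= limit: break
--     return res
-- ===== SOURCE B (Python) =====
-- def is_debug(l):
--     s = l.strip()
--     if not s:
--         return False
--     return s.startswith(("[DEBUG]", "[MapToAccelerator", "Collecting recurrence",
--                          "[calculateResMii]", "Dumping DFG", "[generate-code]",
--                          "Recurrence cycle"))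
--
-- def process_meta(lines, limit=25):
--     # classify every non-empty line once, then a pairwise zip over the
--     # classification table replaces A's carried skip_next flag
--     kept = [(l.strip(), is_debug(l)) for l in lines if l.strip()]
--     prev_flags = [False] + [d for _, d in kept]
--     tagged = [(prev, s) for (s, d), prev in zip(kept, prev_flags) if not d]
--     return tagged[:limit] if limit > 0 else []
-- ===== Notes on version B (the rewrite author's own statement) =====
-- stated objective: alternative
-- what changed: B replaces A's single flag-carrying loop (skip_next/count/break) with a precomputed per-line classification table: filter to non-empty lines with their is_debug flags, zip each kept line with the previous line's flag, filter out debug lines, then cap with a slice.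
-- intended difference: When limit <= 0 and the input contains at least one non-empty non-debug line, A's append-then-check loop still returns that first line as a one-element result although the cap is zero or negative, while B returns an empty result as a cap of at most zero kept lines intends. — e.g. on process_meta(["hello"], 0): A returns [(false, "hello")], B returns []
import Mathlib
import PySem

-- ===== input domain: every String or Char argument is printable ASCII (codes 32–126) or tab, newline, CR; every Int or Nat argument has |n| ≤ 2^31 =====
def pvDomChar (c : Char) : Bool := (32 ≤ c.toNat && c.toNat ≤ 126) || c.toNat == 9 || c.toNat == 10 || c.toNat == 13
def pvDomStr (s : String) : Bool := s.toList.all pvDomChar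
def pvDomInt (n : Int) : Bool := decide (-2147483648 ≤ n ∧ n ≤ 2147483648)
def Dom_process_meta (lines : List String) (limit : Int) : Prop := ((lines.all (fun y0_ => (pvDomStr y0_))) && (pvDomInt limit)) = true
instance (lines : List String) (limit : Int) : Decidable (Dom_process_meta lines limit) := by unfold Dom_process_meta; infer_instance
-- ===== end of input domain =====

-- B tags each non-debug line via a precomputed classification table + pairwise zip instead of A's
-- carried skip_next flag; return values only, A mutates nothing. B intentionally returns an empty result for
-- limit ≤ 0 (see D_process_meta below).

-- shared module helper is_debug (defined once at module level in the Python source)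
def is_debug (l : String) : Bool :=
  let s := PySem.Str.strip l
  if s = "" then false
  else if PySem.Str.startswith s "[DEBUG]" || PySem.Str.startswith s "[MapToAccelerator" ||
          PySem.Str.startswith s "Collecting recurrence" || PySem.Str.startswith s "[calculateResMii]" ||
          PySem.Str.startswith s "Dumping DFG" || PySem.Str.startswith s "[generate-code]" ||
          PySem.Str.startswith s "Recurrence cycle" then true
  else false

-- ===== PORT A =====
-- A's for-loop with continue/break, carried (res, skip_next, count), as structural recursion
def pmLoopA (limit : Int) : List String → List (Bool × String) → Bool → Int → List (Bool × String)
  | [], res, _, _ => res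
  | l :: rest, res, skip_next, count =>
    let s := PySem.Str.strip l
    if s = "" then pmLoopA limit rest res skip_next count
    else if is_debug l then pmLoopA limit rest res true count
    else
      let res' := res ++ [(skip_next, s)]
      let count' := count + 1
      if count' ≥ limit then res' else pmLoopA limit rest res' false count'

def process_meta (lines : List String) (limit : Int) : List (Bool × String) :=
  pmLoopA limit lines [] false 0

-- ===== PORT B =====
def process_meta_alt (lines : List String) (limit : Int) : List (Bool × String) :=
  let kept := lines.filterMap (fun l =>
    if PySem.Str.strip l ≠ "" then some (PySem.Str.strip l, is_debug l) else none)
  let prev_flags := false :: kept.map Prod.snd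
  let tagged := (kept.zip prev_flags).filterMap (fun p =>
    if p.1.2 = false then some (p.2, p.1.1) else none)
  if limit > 0 then PySem.List.slice tagged none (some limit) else []

-- ===== PRECONDITION & SPEC =====
-- When limit ≤ 0 and some non-empty non-debug line exists, A's append-then-check loop still returns
-- that first line although the cap is zero or negative; B returns [], the intended value of a cap ≤ 0.
def D_process_meta (lines : List String) (limit : Int) : Prop :=
  limit ≤ 0 ∧ ∃ l ∈ lines, PySem.Str.strip l ≠ "" ∧ is_debug l = false
instance (lines : List String) (limit : Int) : Decidable (D_process_meta lines limit) := by
  unfold D_process_meta; infer_instance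

def Spec_process_meta (lines : List String) (limit : Int) (out : List (Bool × String)) : Prop :=
  ¬ D_process_meta lines limit → out = process_meta_alt lines limit
instance (lines : List String) (limit : Int) (out : List (Bool × String)) : Decidable (Spec_process_meta lines limit out) := by unfold Spec_process_meta; infer_instance

def pvDiffWitness_process_meta : List String × Int := (["hello"], 0)
def pvDiffWitnessOut_process_meta : (List (Bool × String)) × (List (Bool × String)) :=
  ([(false, "hello")], [])

-- ===== CLAIM (what is proved, stated in full; the proofs are below) =====
def Claim_unchanged_process_meta : Prop := ∀ (lines : List String) (limit : Int), Dom_process_meta lines limit → Spec_process_meta lines limit (process_meta lines limit)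
def Claim_changed_process_meta : Prop := Dom_process_meta (pvDiffWitness_process_meta.1) (pvDiffWitness_process_meta.2) ∧ D_process_meta (pvDiffWitness_process_meta.1) (pvDiffWitness_process_meta.2) ∧ process_meta (pvDiffWitness_process_meta.1) (pvDiffWitness_process_meta.2) = pvDiffWitnessOut_process_meta.1 ∧ process_meta_alt (pvDiffWitness_process_meta.1) (pvDiffWitness_process_meta.2) = pvDiffWitnessOut_process_meta.2 ∧ pvDiffWitnessOut_process_meta.1 ≠ pvDiffWitnessOut_process_meta.2
def Claim_exact_process_meta : Prop := ∀ (lines : List String) (limit : Int), Dom_process_meta lines limit → D_process_meta lines limit → process_meta lines limit ≠ process_meta_alt lines limit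

-- ===== LEMMAS AND PROOFS =====

-- the full (uncapped) tagged stream produced from `lines` with incoming flag `f`
def taggedFrom : List String → Bool → List (Bool × String)
  | [], _ => []
  | l :: rest, f =>
    let s := PySem.Str.strip l
    if s = "" then taggedFrom rest f
    else if is_debug l then taggedFrom rest true
    else (f, s) :: taggedFrom rest false

-- A's loop = take (limit - count) of the tagged stream, as long as count < limit
theorem pmLoopA_eq_take (limit : Int) (lines : List String) :
    ∀ (res : List (Bool × String)) (skip : Bool) (count : Int), count < limit →
      pmLoopA limit lines res skip count = res ++ (taggedFrom lines skip).take (limit - count).toNat := by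
  induction lines with
  | nil => intro res skip count _; simp [pmLoopA, taggedFrom]
  | cons l rest ih =>
    intro res skip count hlt
    simp only [pmLoopA, taggedFrom]
    by_cases hs : PySem.Str.strip l = ""
    · simp [hs, ih res skip count hlt]
    · by_cases hd : is_debug l
      · simp [hs, hd, ih res true count hlt]
      · simp only [hs, hd, if_false, Bool.false_eq_true]
        by_cases hstop : count + 1 ≥ limit
        · have hlim : limit - count = 1 := by omega
          simp [hstop, hlim]
        · have h1 : (limit - count).toNat = (limit - (count + 1)).toNat + 1 := by omega
          simp [hstop, ih (res ++ [(skip, PySem.Str.strip l)]) false (count + 1) (by omega), h1]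

-- B's zip/filter over the kept table = the tagged stream
theorem zipTag_eq_taggedFrom (lines : List String) : ∀ (f : Bool),
    ((lines.filterMap (fun l =>
        if PySem.Str.strip l ≠ "" then some (PySem.Str.strip l, is_debug l) else none)).zip
      (f :: (lines.filterMap (fun l =>
        if PySem.Str.strip l ≠ "" then some (PySem.Str.strip l, is_debug l) else none)).map Prod.snd)).filterMap
      (fun p => if p.1.2 = false then some (p.2, p.1.1) else none)
    = taggedFrom lines f := by
  induction lines with
  | nil => intro f; simp [taggedFrom]
  | cons l rest ih =>
    intro f
    by_cases hs : PySem.Str.strip l = ""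
    · simpa [taggedFrom, hs] using ih f
    · by_cases hd : is_debug l
      · simpa [taggedFrom, hs, hd, List.filterMap_cons, List.zip] using ih true
      · simpa [taggedFrom, hs, hd, List.filterMap_cons, List.zip] using ih false

-- if every line is empty or debug, A's loop appends nothing
theorem pmLoopA_all_skipped (limit : Int) (lines : List String)
    (h : ∀ l ∈ lines, PySem.Str.strip l = "" ∨ is_debug l = true) :
    ∀ (res : List (Bool × String)) (skip : Bool) (count : Int),
      pmLoopA limit lines res skip count = res := by
  induction lines with
  | nil => intro res skip count; simp [pmLoopA]
  | cons l rest ih =>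
    intro res skip count
    have hl := h l (by simp)
    have hrest : ∀ l ∈ rest, PySem.Str.strip l = "" ∨ is_debug l = true := by
      intro x hx; exact h x (by simp [hx])
    simp only [pmLoopA]
    rcases hl with hs | hd
    · simp [hs, ih hrest]
    · by_cases hs : PySem.Str.strip l = ""
      · simp [hs, ih hrest]
      · simp [hs, hd, ih hrest]

-- with limit ≤ 0 and a kept line present, A's loop adds exactly one element
theorem pmLoopA_nonpos_len (limit : Int) (hlim : limit ≤ 0) (lines : List String) :
    ∀ (res : List (Bool × String)) (skip : Bool),
      (∃ l ∈ lines, PySem.Str.strip l ≠ "" ∧ is_debug l = false) →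
      (pmLoopA limit lines res skip 0).length = res.length + 1 := by
  induction lines with
  | nil => intro _ _ h; simp at h
  | cons l rest ih =>
    intro res skip h
    simp only [pmLoopA]
    by_cases hs : PySem.Str.strip l = ""
    · have : ∃ x ∈ rest, PySem.Str.strip x ≠ "" ∧ is_debug x = false := by
        rcases h with ⟨x, hx, h1, h2⟩
        rcases List.mem_cons.mp hx with rfl | hx'
        · exact absurd hs h1
        · exact ⟨x, hx', h1, h2⟩
      simp [hs, ih res skip this]
    · by_cases hd : is_debug l
      · have : ∃ x ∈ rest, PySem.Str.strip x ≠ "" ∧ is_debug x = false := by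
          rcases h with ⟨x, hx, h1, h2⟩
          rcases List.mem_cons.mp hx with rfl | hx'
          · rw [hd] at h2; exact absurd h2 (by simp)
          · exact ⟨x, hx', h1, h2⟩
        simp [hs, hd, ih res true this]
      · simp [hs, hd, show limit ≤ 1 by omega]

-- ===== VERDICT (by name: the statement is the Claim_ definition above) =====
theorem process_meta_spec : Claim_unchanged_process_meta := by
  intro lines limit _ hnd
  unfold process_meta process_meta_alt
  by_cases hpos : limit > 0
  · rw [pmLoopA_eq_take limit lines [] false 0 (by omega)]
    simp only [zipTag_eq_taggedFrom lines false, if_pos hpos]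
    rw [PySem.List.slice_to _ (by omega : (0:Int) ≤ limit)]
    simp
  · have hall : ∀ l ∈ lines, PySem.Str.strip l = "" ∨ is_debug l = true := by
      intro l hl
      by_contra hc
      push Not at hc
      exact hnd ⟨by omega, l, hl, hc.1, Bool.not_eq_true _ ▸ (by simpa using hc.2)⟩
    rw [pmLoopA_all_skipped limit lines hall]
    simp [hpos]

theorem process_meta_changed : Claim_changed_process_meta := by
  unfold Claim_changed_process_meta; decide

theorem process_meta_tight : Claim_exact_process_meta := by
  intro lines limit _ hd
  rcases hd with ⟨hlim, hex⟩
  have hA : (process_meta lines limit).length = 1 := by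
    unfold process_meta
    simp [pmLoopA_nonpos_len limit hlim lines [] false hex]
  have hB : process_meta_alt lines limit = [] := by
    unfold process_meta_alt
    simp [show ¬ limit > 0 by omega]
  intro heq
  rw [heq, hB] at hA
  simp at hA
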